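-- pv_equiv track=rewrite | github.com/SlawomirMiszkurka/pp1 | 09-Test2/p2.py | f
-- ===== SOURCE A (Python) =====
-- def f(human_age):
--     dogs_age=0
--     for i in range(1,human_age+1):
--         if i<3:
--             dogs_age+=10
--         else:
--             dogs_age+=4
--     return dogs_age
-- ===== SOURCE B (Python) =====
-- def f(human_age):
--     # closed form: first two human years give 10 points each, the rest 4 each
--     if human_age <= 0:
--         return 0
--     if human_age <= 2:
--         return 10 * human_age
--     return 20 + 4 * (human_age - 2)
-- ===== Notes on version B (the rewrite author's own statement) =====
-- stated objective: faster
-- what changed: Replaced the O(n) year-by-year accumulation loop with a closed-form arithmetic formula splitting the first two years (10 points each) from the remaining years (4 points each).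
import Mathlib
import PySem

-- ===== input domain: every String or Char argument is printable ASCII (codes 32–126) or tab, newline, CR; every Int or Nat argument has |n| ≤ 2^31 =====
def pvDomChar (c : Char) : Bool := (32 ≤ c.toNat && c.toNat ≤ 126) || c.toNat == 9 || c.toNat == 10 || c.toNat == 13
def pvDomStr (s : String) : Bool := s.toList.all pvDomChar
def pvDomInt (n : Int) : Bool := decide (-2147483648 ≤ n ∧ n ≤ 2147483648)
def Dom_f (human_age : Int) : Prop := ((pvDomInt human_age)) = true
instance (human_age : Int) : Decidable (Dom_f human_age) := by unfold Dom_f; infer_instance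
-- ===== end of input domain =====

-- B replaces A's per-year accumulation loop with a closed-form arithmetic formula (objective: faster, O(1) vs O(n)).

-- ===== PORT A =====
def f (human_age : Int) : Int :=
  (PySem.List.pyRange 1 (human_age + 1) 1).foldl
    (fun dogs_age i => if i < 3 then dogs_age + 10 else dogs_age + 4) 0

-- ===== PORT B =====
def f_alt (human_age : Int) : Int :=
  if human_age ≤ 0 then 0
  else if human_age ≤ 2 then 10 * human_age
  else 20 + 4 * (human_age - 2)

-- ===== PRECONDITION & SPEC =====
def Spec_f (human_age : Int) (out : Int) : Prop := out = f_alt human_age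
instance (human_age : Int) (out : Int) : Decidable (Spec_f human_age out) := by unfold Spec_f; infer_instance

-- ===== CLAIM (what is proved, stated in full; the proofs are below) =====
def Claim_equal_f : Prop := ∀ (human_age : Int), Dom_f human_age → Spec_f human_age (f human_age)

-- ===== LEMMAS AND PROOFS =====
theorem f_eq_alt_ofNat (m : Nat) : f (m : Int) = f_alt (m : Int) := by
  induction m with
  | zero => simp [f, f_alt, PySem.List.pyRange_one_eq_nil]
  | succ k ih =>
    have h1 : (1 : Int) ≤ (k : Int) + 1 := by omega
    have hsplit : PySem.List.pyRange 1 ((k : Int) + 1 + 1) 1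
        = PySem.List.pyRange 1 ((k : Int) + 1) 1 ++ [(k : Int) + 1] :=
      PySem.List.pyRange_one_succ_right h1
    have : f ((k : Int) + 1)
        = (if (k : Int) + 1 < 3 then f (k : Int) + 10 else f (k : Int) + 4) := by
      simp [f, hsplit, List.foldl_append]
    push_cast
    rw [this, ih]
    unfold f_alt
    split_ifs <;> omega

theorem f_eq_alt (n : Int) : f n = f_alt n := by
  rcases n with m | m
  · exact f_eq_alt_ofNat m
  · have : f (Int.negSucc m) = 0 := by
      simp [f, PySem.List.pyRange_one_eq_nil (by omega : Int.negSucc m + 1 ≤ 1)]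
    rw [this]
    simp [f_alt, show Int.negSucc m ≤ 0 by omega]

-- ===== VERDICT (by name: the statement is the Claim_ definition above) =====
theorem f_spec : Claim_equal_f := fun n _ => f_eq_alt n
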